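-- pv_equiv track=rewrite | github.com/jreyesv063/Wprime_plus_b_BSM3G | utils.py | divide_list
-- ===== SOURCE A (Python) =====
-- def divide_list(lst: list, n: int) -> list:
--     """Divide a list into n sublists"""
--     size = len(lst) // n
--     remainder = len(lst) % n
--     result = []
--     start = 0
--     for i in range(n):
--         if i < remainder:
--             end = start + size + 1
--         else:
--             end = start + size
--         result.append(lst[start:end])
--         start = end
--     return result
-- ===== SOURCE B (Python) =====
-- def divide_list(lst: list, n: int) -> list:
--     """Divide a list into n sublists"""
--     size, rem = divmod(len(lst), n)
--     return [lst[i * size + min(i, rem): (i + 1) * size + min(i + 1, rem)]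
--             for i in range(n)]
-- ===== Notes on version B (the rewrite author's own statement) =====
-- stated objective: simpler
-- what changed: Replaces the loop that threads a running start/end accumulator with a single comprehension whose slice boundaries are computed independently from the closed form i*size+min(i,rem).
import Mathlib
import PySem

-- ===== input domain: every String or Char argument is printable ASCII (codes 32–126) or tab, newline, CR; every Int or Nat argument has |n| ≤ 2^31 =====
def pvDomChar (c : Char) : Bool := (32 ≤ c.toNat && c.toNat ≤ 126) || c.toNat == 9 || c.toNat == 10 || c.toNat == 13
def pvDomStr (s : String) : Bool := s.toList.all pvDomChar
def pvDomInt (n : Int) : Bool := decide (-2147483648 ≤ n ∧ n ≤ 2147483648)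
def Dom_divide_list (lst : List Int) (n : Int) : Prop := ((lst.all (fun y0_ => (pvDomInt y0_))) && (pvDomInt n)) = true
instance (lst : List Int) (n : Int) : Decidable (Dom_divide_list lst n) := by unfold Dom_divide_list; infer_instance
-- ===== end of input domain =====

-- B computes each sublist's slice boundaries from the closed form i*size+min(i,rem)
-- instead of threading a running start accumulator; objective: simpler.


-- ===== PORT A =====
def divide_list (lst : List Int) (n : Int) : List (List Int) :=
  let size := PySem.Int.floordiv (lst.length : Int) n
  let remainder := PySem.Int.mod (lst.length : Int) n
  ((PySem.List.pyRange 0 n 1).foldl (fun (acc : List (List Int) × Int) i =>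
      let e := if i < remainder then acc.2 + size + 1 else acc.2 + size
      (acc.1 ++ [PySem.List.slice lst (some acc.2) (some e)], e))
    ([], 0)).1

-- ===== PORT B =====
def divide_list_alt (lst : List Int) (n : Int) : List (List Int) :=
  let size := PySem.Int.floordiv (lst.length : Int) n
  let rem := PySem.Int.mod (lst.length : Int) n
  (PySem.List.pyRange 0 n 1).map (fun i =>
    PySem.List.slice lst (some (i * size + min i rem))
                         (some ((i + 1) * size + min (i + 1) rem)))

-- ===== PRECONDITION & SPEC =====
-- Pre_ excludes exactly n = 0, where A raises ZeroDivisionError (len(lst) // n).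
def Pre_divide_list (lst : List Int) (n : Int) : Prop := n ≠ 0
instance (lst : List Int) (n : Int) : Decidable (Pre_divide_list lst n) := by unfold Pre_divide_list; infer_instance
def pvWitness_divide_list : List Int × Int := ([1, 2, 3, 4, 5], 3)

def Spec_divide_list (lst : List Int) (n : Int) (out : List (List Int)) : Prop := out = divide_list_alt lst n
instance (lst : List Int) (n : Int) (out : List (List Int)) : Decidable (Spec_divide_list lst n out) := by unfold Spec_divide_list; infer_instance

-- ===== CLAIM (what is proved, stated in full; the proofs are below) =====
def Claim_equal_divide_list : Prop := ∀ (lst : List Int) (n : Int), Dom_divide_list lst n → Pre_divide_list lst n → Spec_divide_list lst n (divide_list lst n)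

-- ===== LEMMAS AND PROOFS =====

-- Loop invariant: starting the fold at index a with start = a*size + min a rem
-- appends exactly the closed-form slices of B for indices a..n-1.
theorem divide_list_loop (lst : List Int) (size rem n : Int) :
    ∀ (k : Nat) (a : Int) (res : List (List Int)), n = a + k →
    (PySem.List.pyRange a n 1).foldl (fun (acc : List (List Int) × Int) i =>
        let e := if i < rem then acc.2 + size + 1 else acc.2 + size
        (acc.1 ++ [PySem.List.slice lst (some acc.2) (some e)], e))
      (res, a * size + min a rem)
    = (res ++ (PySem.List.pyRange a n 1).map (fun i =>
        PySem.List.slice lst (some (i * size + min i rem))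
                             (some ((i + 1) * size + min (i + 1) rem))),
       n * size + min n rem) := by
  intro k
  induction k with
  | zero =>
    intro a res h
    have ha : a = n := by omega
    subst ha
    have hr : PySem.List.pyRange a a 1 = [] := by simp [PySem.List.pyRange]
    rw [hr]
    simp
  | succ m ih =>
    intro a res h
    have hab : a < n := by omega
    rw [PySem.List.pyRange_one_cons hab]
    simp only [List.foldl_cons, List.map_cons]
    have he : (if a < rem then a * size + min a rem + size + 1 else a * size + min a rem + size)
        = (a + 1) * size + min (a + 1) rem := by
      split_ifs with hc
      · have h1 : min a rem = a := by omega
        have h2 : min (a + 1) rem = a + 1 := by omega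
        rw [h1, h2]; ring
      · have h1 : min a rem = rem := by omega
        have h2 : min (a + 1) rem = rem := by omega
        rw [h1, h2]; ring
    simp only [he]
    rw [ih (a + 1) _ (by omega)]
    simp

theorem divide_list_spec_aux (lst : List Int) (n : Int) (_hn : n ≠ 0) :
    divide_list lst n = divide_list_alt lst n := by
  unfold divide_list divide_list_alt
  by_cases hpos : 0 < n
  · have hrem : 0 ≤ PySem.Int.mod (lst.length : Int) n := PySem.Int.mod_nonneg _ hpos
    clear _hn
    have h0 : (0 : Int) = 0 * (PySem.Int.floordiv (lst.length : Int) n)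
        + min 0 (PySem.Int.mod (lst.length : Int) n) := by
      have : min (0:Int) (PySem.Int.mod (lst.length : Int) n) = 0 := by omega
      simp [this]
    simp only []
    rw [show (([] : List (List Int)), (0:Int)) = (([] : List (List Int)),
        0 * (PySem.Int.floordiv (lst.length : Int) n)
        + min 0 (PySem.Int.mod (lst.length : Int) n)) from by rw [← h0]]
    rw [divide_list_loop lst _ _ n n.toNat 0 [] (by omega)]
    simp
  · have hle : n ≤ 0 := by omega
    have : PySem.List.pyRange 0 n 1 = [] := by
      simp [PySem.List.pyRange]; omega
    simp [this]

-- ===== VERDICT (by name: the statement is the Claim_ definition above) =====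
theorem divide_list_spec : Claim_equal_divide_list := by
  intro lst n _ hpre
  unfold Spec_divide_list
  exact divide_list_spec_aux lst n hpre
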